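-- pv_equiv track=rewrite | github.com/kaleoyster/thesis | methods/nbi.py | utilitySplitBridgeRecords
-- ===== SOURCE A (Python) =====
-- def utilitySplitBridgeRecords(data, profile):
--     """ The ultility function to split records by intervention
--      Takes a 1xn list returns 2xn list"""
--     """Modify here"""
--     counter = 0
--     main_list = []
--     temp_list = []
--     for bval in profile:
--         if bval == True:
--             temp_list.append(data[counter])
--             counter  = counter + 1
--         else:
--             main_list.append(temp_list)
--             temp_list = []
--     main_list.append(temp_list)
--     return main_list
-- ===== SOURCE B (Python) =====
-- def utilitySplitBridgeRecords(data, profile):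
--     """Two-pass bucket scatter: first assign each True a group index (bumping the
--     group counter on every non-True), then preallocate the buckets and drop each
--     consumed data element into its bucket by integer indexing."""
--     groups = []
--     g = 0
--     for bval in profile:
--         if bval == True:
--             groups.append(g)
--         else:
--             g = g + 1
--     result = [[] for _ in range(g + 1)]
--     for i, gi in enumerate(groups):
--         result[gi].append(data[i])
--     return result
-- ===== Notes on version B (the rewrite author's own statement) =====
-- stated objective: alternative
-- what changed: Replaces A's single stateful sweep (running counter plus a temp list flushed into main_list at each separator) with two passes: assign each True a group index, preallocate all buckets, then scatter data[i] into its bucket by integer indexing.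
import Mathlib
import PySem

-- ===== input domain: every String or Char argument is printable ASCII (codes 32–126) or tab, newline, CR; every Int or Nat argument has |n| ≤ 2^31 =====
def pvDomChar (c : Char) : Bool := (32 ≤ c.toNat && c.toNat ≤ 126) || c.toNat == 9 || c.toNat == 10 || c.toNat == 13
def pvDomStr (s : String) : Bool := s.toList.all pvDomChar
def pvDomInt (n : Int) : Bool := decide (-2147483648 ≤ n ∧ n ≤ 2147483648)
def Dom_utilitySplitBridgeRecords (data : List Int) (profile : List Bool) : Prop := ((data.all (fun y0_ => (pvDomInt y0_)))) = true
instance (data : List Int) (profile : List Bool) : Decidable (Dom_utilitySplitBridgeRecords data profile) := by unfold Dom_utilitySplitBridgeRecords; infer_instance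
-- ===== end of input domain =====

-- B replaces A's single stateful sweep (running counter + temp list flushed at each separator) by two
-- passes: assign each True its group index, then scatter the data into preallocated buckets (objective:
-- alternative decomposition, same O(n) cost).

-- ===== PORT A =====
-- state = (counter, main_list, temp_list); Python's counter starts at 0 and only increments, so Nat is
-- value-exact for it; data[counter] is ported as pyGetD (exact under Pre_, which puts every access in range).
def utilitySplitBridgeRecords (data : List Int) (profile : List Bool) : List (List Int) :=
  let s := profile.foldl
    (fun (s : Nat × List (List Int) × List Int) bval =>
      if bval == true then (s.1 + 1, s.2.1, s.2.2 ++ [PySem.List.pyGetD data (s.1 : Int) 0])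
      else (s.1, s.2.1 ++ [s.2.2], []))
    (0, [], [])
  s.2.1 ++ [s.2.2]

-- ===== PORT B =====
-- pass 1: (groups, g); g starts at 0 and only increments and each recorded group index is a value of g,
-- so Nat is value-exact for both; pass 2 scatters data[i] (pyGetD, exact under Pre_) into bucket gi.
def utilitySplitBridgeRecords_alt (data : List Int) (profile : List Bool) : List (List Int) :=
  let p := profile.foldl
    (fun (s : List Nat × Nat) bval =>
      if bval == true then (s.1 ++ [s.2], s.2) else (s.1, s.2 + 1))
    ([], 0)
  let result0 := (PySem.List.pyRange 0 ((p.2 : Int) + 1) 1).map (fun _ => ([] : List Int))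
  (PySem.List.enumerate p.1).foldl
    (fun res (pr : Int × Nat) => res.modify pr.2 (fun b => b ++ [PySem.List.pyGetD data pr.1 0]))
    result0

-- ===== PRECONDITION & SPEC =====
-- Pre_ excludes exactly the inputs with more True entries in profile than data has elements:
-- there Python A (and Python B) raises IndexError.
def Pre_utilitySplitBridgeRecords (data : List Int) (profile : List Bool) : Prop :=
  profile.count true ≤ data.length
instance (data : List Int) (profile : List Bool) : Decidable (Pre_utilitySplitBridgeRecords data profile) := by
  unfold Pre_utilitySplitBridgeRecords; infer_instance

def pvWitness_utilitySplitBridgeRecords : List Int × List Bool :=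
  ([4, 7, 9], [true, true, false, false, true])

def Spec_utilitySplitBridgeRecords (data : List Int) (profile : List Bool) (out : List (List Int)) : Prop := out = utilitySplitBridgeRecords_alt data profile
instance (data : List Int) (profile : List Bool) (out : List (List Int)) : Decidable (Spec_utilitySplitBridgeRecords data profile out) := by unfold Spec_utilitySplitBridgeRecords; infer_instance

-- ===== CLAIM (what is proved, stated in full; the proofs are below) =====
def Claim_equal_utilitySplitBridgeRecords : Prop := ∀ (data : List Int) (profile : List Bool), Dom_utilitySplitBridgeRecords data profile → Pre_utilitySplitBridgeRecords data profile → Spec_utilitySplitBridgeRecords data profile (utilitySplitBridgeRecords data profile)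

-- ===== LEMMAS AND PROOFS =====

-- Reference shape shared by both proofs: (current group, completed groups after it) for the remaining
-- profile, indexing data from absolute position i.
def pvSR (data : List Int) : Int → List Bool → List Int × List (List Int)
  | _, [] => ([], [])
  | i, true :: ps => let r := pvSR data (i + 1) ps; (PySem.List.pyGetD data i 0 :: r.1, r.2)
  | i, false :: ps => let r := pvSR data i ps; ([], r.1 :: r.2)

-- group indices produced by B's first pass, starting from counter g
def pvGF : Nat → List Bool → List Nat
  | _, [] => []
  | g, true :: ps => g :: pvGF g ps
  | g, false :: ps => pvGF (g + 1) ps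

-- number of False entries (separators) in the remaining profile
def pvCF : List Bool → Nat
  | [] => 0
  | true :: ps => pvCF ps
  | false :: ps => pvCF ps + 1

theorem pvA_loop (data : List Int) (ps : List Bool) :
    ∀ (c : Nat) (main : List (List Int)) (temp : List Int),
    (let s := ps.foldl
        (fun (s : Nat × List (List Int) × List Int) bval =>
          if bval == true then (s.1 + 1, s.2.1, s.2.2 ++ [PySem.List.pyGetD data (s.1 : Int) 0])
          else (s.1, s.2.1 ++ [s.2.2], []))
        (c, main, temp)
     s.2.1 ++ [s.2.2])
    = main ++ (temp ++ (pvSR data (c : Int) ps).1) :: (pvSR data (c : Int) ps).2 := by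
  induction ps with
  | nil => intro c main temp; simp [pvSR]
  | cons b ps ih =>
    intro c main temp
    cases b with
    | true =>
      have h := ih (c + 1) main (temp ++ [PySem.List.pyGetD data (c : Int) 0])
      simp only [List.foldl_cons] at h ⊢
      rw [if_pos (show (true == true) = true from rfl), h]
      push_cast
      simp [pvSR]
    | false =>
      have h := ih c (main ++ [temp]) []
      simp only [List.foldl_cons] at h ⊢
      rw [if_neg (by decide), h]
      simp [pvSR]

theorem pvB_pass1 (ps : List Bool) :
    ∀ (acc : List Nat) (g : Nat),
    ps.foldl
      (fun (s : List Nat × Nat) bval =>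
        if bval == true then (s.1 ++ [s.2], s.2) else (s.1, s.2 + 1))
      (acc, g)
    = (acc ++ pvGF g ps, g + pvCF ps) := by
  induction ps with
  | nil => intro acc g; simp [pvGF, pvCF]
  | cons b ps ih =>
    intro acc g
    cases b with
    | true =>
      simp only [List.foldl_cons]
      rw [if_pos (show (true == true) = true from rfl), ih (acc ++ [g]) g]
      simp [pvGF, pvCF]
    | false =>
      simp only [List.foldl_cons]
      rw [if_neg (by decide), ih acc (g + 1)]
      simp only [pvGF, pvCF]
      congr 1
      omega

theorem pvModify_at_boundary (done : List (List Int)) (t : List Int) (rest : List (List Int))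
    (f : List Int → List Int) :
    (done ++ t :: rest).modify done.length f = done ++ f t :: rest := by
  simp [List.modify_eq_set_getElem?]

theorem pvB_scatter (data : List Int) (ps : List Bool) :
    ∀ (done : List (List Int)) (temp : List Int) (i : Int),
    (PySem.List.enumerate (pvGF done.length ps) i).foldl
      (fun res (pr : Int × Nat) => res.modify pr.2 (fun b => b ++ [PySem.List.pyGetD data pr.1 0]))
      (done ++ temp :: List.replicate (pvCF ps) [])
    = done ++ (temp ++ (pvSR data i ps).1) :: (pvSR data i ps).2 := by
  induction ps with
  | nil => intro done temp i; simp [pvGF, pvCF, pvSR]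
  | cons b ps ih =>
    intro done temp i
    cases b with
    | true =>
      have hm := pvModify_at_boundary done temp (List.replicate (pvCF ps) [])
        (fun b => b ++ [PySem.List.pyGetD data i 0])
      simp only [pvGF, pvCF, PySem.List.enumerate, List.foldl_cons]
      rw [hm, ih done (temp ++ [PySem.List.pyGetD data i 0]) (i + 1)]
      simp [pvSR]
    | false =>
      have h := ih (done ++ [temp]) [] i
      simp only [List.length_append, List.length_cons, List.length_nil, Nat.zero_add] at h
      simp only [pvGF, pvCF]
      rw [show done ++ temp :: List.replicate (pvCF ps + 1) ([] : List Int)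
            = (done ++ [temp]) ++ ([] : List Int) :: List.replicate (pvCF ps) [] by
          simp [List.replicate_succ]]
      rw [h]
      simp [pvSR]

theorem pvB_eq (data : List Int) (profile : List Bool) :
    utilitySplitBridgeRecords_alt data profile
    = (pvSR data 0 profile).1 :: (pvSR data 0 profile).2 := by
  unfold utilitySplitBridgeRecords_alt
  rw [pvB_pass1 profile [] 0]
  simp only [List.nil_append, Nat.zero_add]
  have hr : (PySem.List.pyRange 0 ((pvCF profile : Int) + 1) 1).map (fun _ => ([] : List Int))
      = List.replicate (pvCF profile + 1) [] := by
    rw [show ((pvCF profile : Int) + 1) = ((pvCF profile + 1 : Nat) : Int) by push_cast; ring]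
    rw [PySem.List.pyRange_zero_natCast]
    simp [Function.comp_def, List.map_const']
  rw [hr]
  simpa using pvB_scatter data profile [] [] 0

theorem pvA_eq (data : List Int) (profile : List Bool) :
    utilitySplitBridgeRecords data profile
    = (pvSR data 0 profile).1 :: (pvSR data 0 profile).2 := by
  unfold utilitySplitBridgeRecords
  have h := pvA_loop data profile 0 [] []
  simpa using h

-- ===== VERDICT (by name: the statement is the Claim_ definition above) =====
theorem utilitySplitBridgeRecords_spec : Claim_equal_utilitySplitBridgeRecords := by
  intro data profile _ _
  unfold Spec_utilitySplitBridgeRecords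
  rw [pvA_eq, pvB_eq]
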